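-- pv_equiv track=rewrite | github.com/shvarovadasha/python | РПОС_ПР№4/РПОС_ПР№4.2.5.py | another_date
-- ===== SOURCE A (Python) =====
-- def is_leap(year):
--     """Является ли 'year' високосным годом?
--
--     """
--     return (year % 4 == 0 and year % 100 != 0) or (year % 400 == 0)
--
-- def days(month, year):
--     """Вернуть количество дней в месяце 'month' года 'year'.
--     """
--     if month == 2:
--         return 29 if is_leap(year) else 28
--     elif month in [1, 3, 5, 7, 8, 10, 12]:
--         return 31
--     else:
--         return 30
--
-- def another_date(day, month, year, delta=1):
--     """Вернуть день, месяц, год, отличающийся на 'delta' дней.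
--     """
--
--     def previous_date(day, month, year):
--         if day > 1:
--             return day - 1, month, year
--         else:
--             month -= 1
--             if month < 1:
--                 month = 12
--                 year -= 1
--             return days(month, year), month, year
--
--     def next_date(day, month, year):
--         if day < days(month, year):
--             return day + 1, month, year
--         else:
--             day = 1
--             month += 1
--             if month > 12:
--                 month = 1
--                 year += 1
--             return day, month, year
--
--     for _ in range(abs(delta)):
--         if delta > 0:
--             day, month, year = next_date(day, month, year)
--         else:
--             day, month, year = previous_date(day, month, year)
--
--     return day, month, year
-- ===== SOURCE B (Python) =====
-- def is_leap(year):
--     """Является ли 'year' високосным годом?"""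
--     return (year % 4 == 0 and year % 100 != 0) or (year % 400 == 0)
--
--
-- def days(month, year):
--     """Вернуть количество дней в месяце 'month' года 'year'."""
--     if month == 2:
--         return 29 if is_leap(year) else 28
--     elif month in [1, 3, 5, 7, 8, 10, 12]:
--         return 31
--     else:
--         return 30
--
--
-- def another_date(day, month, year, delta=1):
--     """Вернуть день, месяц, год, отличающийся на 'delta' дней.
--
--     Обрабатывает сразу целый месяц за итерацию (прыжок до границы месяца),
--     а не по одному дню.
--     """
--     steps = abs(delta)
--     if delta > 0:
--         while steps:
--             dm = days(month, year)
--             if day < dm: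
--                 jump = min(steps, dm - day)
--                 day += jump
--                 steps -= jump
--             else:
--                 day, month, steps = 1, month + 1, steps - 1
--                 if month > 12:
--                     month, year = 1, year + 1
--     else:
--         while steps:
--             if day > 1:
--                 jump = min(steps, day - 1)
--                 day -= jump
--                 steps -= jump
--             else:
--                 month, steps = month - 1, steps - 1
--                 if month < 1:
--                     month, year = 12, year - 1
--                 day = days(month, year)
--     return day, month, year
-- ===== Notes on version B (the rewrite author's own statement) =====
-- stated objective: faster
-- what changed: A advances the date one day at a time for |delta| iterations; B processes a whole month per iteration, jumping straight to the month boundary with a single min() arithmetic step, so the loop runs about |delta|/30 times instead of |delta| times.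
import Mathlib
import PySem

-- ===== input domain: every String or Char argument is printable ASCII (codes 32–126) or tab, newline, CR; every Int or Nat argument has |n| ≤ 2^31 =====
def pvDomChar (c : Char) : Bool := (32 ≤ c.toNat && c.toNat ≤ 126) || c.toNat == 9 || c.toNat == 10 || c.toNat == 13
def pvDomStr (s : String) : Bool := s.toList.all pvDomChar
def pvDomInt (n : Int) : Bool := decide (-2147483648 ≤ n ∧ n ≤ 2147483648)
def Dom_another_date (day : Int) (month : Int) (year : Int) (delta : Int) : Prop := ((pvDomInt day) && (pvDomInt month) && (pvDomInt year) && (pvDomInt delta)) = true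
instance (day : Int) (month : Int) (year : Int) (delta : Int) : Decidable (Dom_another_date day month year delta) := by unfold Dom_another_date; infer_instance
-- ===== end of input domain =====

-- B replaces A's one-day-at-a-time walk by month-sized batched jumps (min to the month
-- boundary), a constant-factor (~30x) faster loop; equal to A on all inputs, no Pre_.


-- ===== PORT A =====
def pyIsLeap (year : Int) : Bool :=
  (PySem.Int.mod year 4 == 0 && !(PySem.Int.mod year 100 == 0)) || PySem.Int.mod year 400 == 0

def pyDays (month : Int) (year : Int) : Int :=
  if month == 2 then (if pyIsLeap year then 29 else 28)
  else if [(1:Int),3,5,7,8,10,12].contains month then 31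
  else 30

def adPrev (day : Int) (month : Int) (year : Int) : Int × Int × Int :=
  if day > 1 then (day - 1, month, year)
  else
    let month := month - 1
    if month < 1 then (pyDays 12 (year - 1), 12, year - 1)
    else (pyDays month year, month, year)

def adNext (day : Int) (month : Int) (year : Int) : Int × Int × Int :=
  if day < pyDays month year then (day + 1, month, year)
  else
    let month := month + 1
    if month > 12 then (1, 1, year + 1)
    else (1, month, year)

def another_date (day : Int) (month : Int) (year : Int) (delta : Int) : List Int :=
  let st := (List.range delta.natAbs).foldl
    (fun (st : Int × Int × Int) _ =>
      if delta > 0 then adNext st.1 st.2.1 st.2.2 else adPrev st.1 st.2.1 st.2.2)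
    (day, month, year)
  [st.1, st.2.1, st.2.2]

-- ===== PORT B =====
-- B's is_leap / days are the same module helpers as A's (shared table of month lengths).
def bDays (month : Int) (year : Int) : Int :=
  if month == 2 then (if pyIsLeap year then 29 else 28)
  else if [(1:Int),3,5,7,8,10,12].contains month then 31
  else 30

-- forward while-loop of B: a whole month per iteration
def bFwd (steps : Nat) (day : Int) (month : Int) (year : Int) : Int × Int × Int :=
  if h0 : steps = 0 then (day, month, year)
  else if hd : day < bDays month year then
    bFwd (steps - min steps (bDays month year - day).toNat)
      (day + (min steps (bDays month year - day).toNat : Int)) month year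
  else if month + 1 > 12 then bFwd (steps - 1) 1 1 (year + 1)
  else bFwd (steps - 1) 1 (month + 1) year
termination_by steps
decreasing_by
  · omega
  · omega
  · omega

-- backward while-loop of B: a whole month per iteration
def bBwd (steps : Nat) (day : Int) (month : Int) (year : Int) : Int × Int × Int :=
  if h0 : steps = 0 then (day, month, year)
  else if hd : day > 1 then
    bBwd (steps - min steps (day - 1).toNat)
      (day - (min steps (day - 1).toNat : Int)) month year
  else if month - 1 < 1 then bBwd (steps - 1) (bDays 12 (year - 1)) 12 (year - 1)
  else bBwd (steps - 1) (bDays (month - 1) year) (month - 1) year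
termination_by steps
decreasing_by
  · omega
  · omega
  · omega

def another_date_alt (day : Int) (month : Int) (year : Int) (delta : Int) : List Int :=
  let st := if delta > 0 then bFwd delta.natAbs day month year
            else bBwd delta.natAbs day month year
  [st.1, st.2.1, st.2.2]

-- ===== PRECONDITION & SPEC =====
-- A returns normally on every input (it never raises), so no Pre_ is needed.
def Spec_another_date (day : Int) (month : Int) (year : Int) (delta : Int) (out : List Int) : Prop := out = another_date_alt day month year delta
instance (day : Int) (month : Int) (year : Int) (delta : Int) (out : List Int) : Decidable (Spec_another_date day month year delta out) := by unfold Spec_another_date; infer_instance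

-- ===== CLAIM (what is proved, stated in full; the proofs are below) =====
def Claim_equal_another_date : Prop := ∀ (day : Int) (month : Int) (year : Int) (delta : Int), Dom_another_date day month year delta → Spec_another_date day month year delta (another_date day month year delta)

-- ===== LEMMAS AND PROOFS =====

-- A fold that ignores the list elements is an iterate of the step function.
theorem foldl_ignore {α β : Type} (g : α → α) (l : List β) (init : α) :
    l.foldl (fun st _ => g st) init = g^[l.length] init := by
  induction l generalizing init with
  | nil => simp
  | cons x xs ih => simp [ih, Function.iterate_succ_apply]

-- j unit forward steps inside one month just add j to the day.
theorem next_lin (j : Nat) : ∀ (d m y : Int), (j : Int) ≤ pyDays m y - d →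
    (fun st : Int × Int × Int => adNext st.1 st.2.1 st.2.2)^[j] (d, m, y) = (d + j, m, y) := by
  induction j with
  | zero => intro d m y _; simp
  | succ j ih =>
    intro d m y h
    rw [Function.iterate_succ_apply]
    show (fun st : Int × Int × Int => adNext st.1 st.2.1 st.2.2)^[j] (adNext d m y) = _
    have hstep : adNext d m y = (d + 1, m, y) := by
      unfold adNext
      rw [if_pos (by push_cast at h; omega)]
    rw [hstep, ih (d + 1) m y (by push_cast at h ⊢; omega)]
    congr 1
    push_cast
    ring

-- j unit backward steps inside one month just subtract j from the day.
theorem prev_lin (j : Nat) : ∀ (d m y : Int), (j : Int) ≤ d - 1 →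
    (fun st : Int × Int × Int => adPrev st.1 st.2.1 st.2.2)^[j] (d, m, y) = (d - j, m, y) := by
  induction j with
  | zero => intro d m y _; simp
  | succ j ih =>
    intro d m y h
    rw [Function.iterate_succ_apply]
    show (fun st : Int × Int × Int => adPrev st.1 st.2.1 st.2.2)^[j] (adPrev d m y) = _
    have hstep : adPrev d m y = (d - 1, m, y) := by
      unfold adPrev
      rw [if_pos (by push_cast at h; omega)]
    rw [hstep, ih (d - 1) m y (by push_cast at h ⊢; omega)]
    congr 1
    push_cast
    ring

theorem bDays_eq (m y : Int) : bDays m y = pyDays m y := rfl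

-- B's batched forward loop equals s iterations of A's unit step.
theorem bFwd_eq (s : Nat) : ∀ (d m y : Int),
    bFwd s d m y = (fun st : Int × Int × Int => adNext st.1 st.2.1 st.2.2)^[s] (d, m, y) := by
  induction s using Nat.strong_induction_on with
  | _ s ih =>
    intro d m y
    rw [bFwd]
    by_cases h0 : s = 0
    · simp [h0]
    rw [dif_neg h0]
    by_cases hd : d < bDays m y
    · rw [dif_pos hd, ← Nat.cast_min]
      set k := min s (bDays m y - d).toNat with hk
      have hk1 : 1 ≤ k := by omega
      have hks : k ≤ s := by omega
      have hsplit : (fun st : Int × Int × Int => adNext st.1 st.2.1 st.2.2)^[s] (d, m, y)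
          = (fun st : Int × Int × Int => adNext st.1 st.2.1 st.2.2)^[s - k]
              ((fun st : Int × Int × Int => adNext st.1 st.2.1 st.2.2)^[k] (d, m, y)) := by
        rw [← Function.iterate_add_apply]
        congr 1
        omega
      rw [hsplit, next_lin k d m y (by rw [← bDays_eq]; omega), ih (s - k) (by omega)]
    · rw [dif_neg hd]
      have hstep : adNext d m y = if m + 1 > 12 then (1, 1, y + 1) else (1, m + 1, y) := by
        unfold adNext
        rw [if_neg (by rw [← bDays_eq]; omega)]
      obtain ⟨t, rfl⟩ : ∃ t, s = t + 1 := ⟨s - 1, by omega⟩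
      simp only [Nat.add_sub_cancel, Function.iterate_succ_apply]
      rw [hstep]
      by_cases h12 : m + 1 > 12
      · rw [if_pos h12, if_pos h12]
        exact ih t (by omega) 1 1 (y + 1)
      · rw [if_neg h12, if_neg h12]
        exact ih t (by omega) 1 (m + 1) y

-- B's batched backward loop equals s iterations of A's unit step.
theorem bBwd_eq (s : Nat) : ∀ (d m y : Int),
    bBwd s d m y = (fun st : Int × Int × Int => adPrev st.1 st.2.1 st.2.2)^[s] (d, m, y) := by
  induction s using Nat.strong_induction_on with
  | _ s ih =>
    intro d m y
    rw [bBwd]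
    by_cases h0 : s = 0
    · simp [h0]
    rw [dif_neg h0]
    by_cases hd : d > 1
    · rw [dif_pos hd, ← Nat.cast_min]
      set k := min s (d - 1).toNat with hk
      have hk1 : 1 ≤ k := by omega
      have hks : k ≤ s := by omega
      have hsplit : (fun st : Int × Int × Int => adPrev st.1 st.2.1 st.2.2)^[s] (d, m, y)
          = (fun st : Int × Int × Int => adPrev st.1 st.2.1 st.2.2)^[s - k]
              ((fun st : Int × Int × Int => adPrev st.1 st.2.1 st.2.2)^[k] (d, m, y)) := by
        rw [← Function.iterate_add_apply]
        congr 1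
        omega
      rw [hsplit, prev_lin k d m y (by omega), ih (s - k) (by omega)]
    · rw [dif_neg hd]
      have hstep : adPrev d m y = if m - 1 < 1 then (pyDays 12 (y - 1), 12, y - 1)
          else (pyDays (m - 1) y, m - 1, y) := by
        unfold adPrev
        rw [if_neg (by omega)]
      obtain ⟨t, rfl⟩ : ∃ t, s = t + 1 := ⟨s - 1, by omega⟩
      simp only [Nat.add_sub_cancel, Function.iterate_succ_apply]
      rw [hstep, bDays_eq]
      by_cases h1 : m - 1 < 1
      · rw [if_pos h1, if_pos h1]
        exact ih t (by omega) (pyDays 12 (y - 1)) 12 (y - 1)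
      · rw [if_neg h1, if_neg h1, bDays_eq]
        exact ih t (by omega) (pyDays (m - 1) y) (m - 1) y

-- ===== VERDICT (by name: the statement is the Claim_ definition above) =====
theorem another_date_spec : Claim_equal_another_date := by
  intro day month year delta _
  unfold Spec_another_date
  simp only [another_date, another_date_alt]
  by_cases hpos : delta > 0
  · have hfun : (fun (st : Int × Int × Int) (_ : Nat) =>
        if delta > 0 then adNext st.1 st.2.1 st.2.2 else adPrev st.1 st.2.1 st.2.2)
        = fun st _ => adNext st.1 st.2.1 st.2.2 := by
      funext st i; simp [hpos]
    rw [hfun, foldl_ignore, List.length_range, if_pos hpos, bFwd_eq]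
  · have hfun : (fun (st : Int × Int × Int) (_ : Nat) =>
        if delta > 0 then adNext st.1 st.2.1 st.2.2 else adPrev st.1 st.2.1 st.2.2)
        = fun st _ => adPrev st.1 st.2.1 st.2.2 := by
      funext st i; simp [hpos]
    rw [hfun, foldl_ignore, List.length_range, if_neg hpos, bBwd_eq]
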